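-- pv_equiv track=rewrite | github.com/db-Lee/iclr2026-5078 | multigenprm/data/deprecated_preprocess_noisy_data2.py | normalize_process_labels
-- ===== SOURCE A (Python) =====
-- def normalize_process_labels(labels):
--     """
--     Normalize labels to valid process format: [1,1,1,...,-1,-1,-1,...]
--     Once we find the first -1, all subsequent labels become -1.
--     """
--     if not labels:
--         return []
--
--     normalized = labels.copy()
--     first_error_pos = None
--
--     for i, label in enumerate(labels):
--         if label == -1:
--             first_error_pos = i
--             break
--
--     if first_error_pos is not None:
--         for i in range(first_error_pos, len(normalized)):
--             normalized[i] = -1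
--
--     return normalized
-- ===== SOURCE B (Python) =====
-- def normalize_process_labels(labels):
--     """Single forward pass: once -1 is seen, emit -1 for the rest."""
--     out = []
--     seen_error = False
--     for label in labels:
--         if label == -1:
--             seen_error = True
--         out.append(-1 if seen_error else label)
--     return out
-- ===== Notes on version B (the rewrite author's own statement) =====
-- stated objective: simpler
-- what changed: Replaced A's two-pass locate-then-fill (find first -1, then overwrite a copied list in place over an index range) by a single forward pass with a seen_error flag that builds the output list directly.
import Mathlib
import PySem

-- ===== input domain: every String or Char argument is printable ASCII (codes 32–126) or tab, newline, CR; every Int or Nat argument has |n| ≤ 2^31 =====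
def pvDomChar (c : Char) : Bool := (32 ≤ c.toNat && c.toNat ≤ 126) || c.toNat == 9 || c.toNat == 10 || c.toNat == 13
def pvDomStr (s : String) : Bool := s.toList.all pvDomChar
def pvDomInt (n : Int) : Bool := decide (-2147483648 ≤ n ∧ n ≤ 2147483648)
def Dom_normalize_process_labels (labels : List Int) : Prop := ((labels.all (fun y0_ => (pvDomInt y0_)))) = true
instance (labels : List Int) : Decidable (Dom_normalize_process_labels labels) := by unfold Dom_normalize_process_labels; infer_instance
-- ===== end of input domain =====

-- B replaces A's two-pass locate-then-fill with a single forward pass carrying a seen-error flag (simpler decomposition, same O(n)).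


-- ===== PORT A =====
-- 'for i, label in enumerate(labels): if label == -1: first_error_pos = i; break'
def pvFindErr : List Int → Nat → Option Nat
  | [], _ => none
  | l :: ls, i => if l = -1 then some i else pvFindErr ls (i + 1)

-- 'for i in range(first_error_pos, len(normalized)): normalized[i] = -1'
-- (range(p, n) with p ≤ n is exactly List.range' p (n - p))
def pvFill (normalized : List Int) (p : Nat) : List Int :=
  (List.range' p (normalized.length - p)).foldl (fun acc i => acc.set i (-1)) normalized

def normalize_process_labels (labels : List Int) : List Int :=
  if labels = [] then []
  else
    let normalized := labels
    match pvFindErr labels 0 with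
    | none => normalized
    | some p => pvFill normalized p

-- ===== PORT B =====
def pvGoB : List Int → Bool → List Int
  | [], _ => []
  | l :: ls, seen =>
    let seen' := seen || decide (l = -1)
    (if seen' then -1 else l) :: pvGoB ls seen'

def normalize_process_labels_alt (labels : List Int) : List Int :=
  pvGoB labels false

-- ===== PRECONDITION & SPEC =====
def Spec_normalize_process_labels (labels : List Int) (out : List Int) : Prop := out = normalize_process_labels_alt labels
instance (labels : List Int) (out : List Int) : Decidable (Spec_normalize_process_labels labels out) := by unfold Spec_normalize_process_labels; infer_instance

-- ===== CLAIM (what is proved, stated in full; the proofs are below) =====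
def Claim_equal_normalize_process_labels : Prop := ∀ (labels : List Int), Dom_normalize_process_labels labels → Spec_normalize_process_labels labels (normalize_process_labels labels)

-- ===== LEMMAS AND PROOFS =====

theorem pvGoB_true (ls : List Int) : pvGoB ls true = List.replicate ls.length (-1) := by
  induction ls with
  | nil => rfl
  | cons l ls ih => simp [pvGoB, ih, List.replicate_succ]

theorem pvFindErr_none (ls : List Int) (i : Nat) (h : pvFindErr ls i = none) :
    pvGoB ls false = ls := by
  induction ls generalizing i with
  | nil => rfl
  | cons l ls ih =>
    by_cases hl : l = -1
    · simp [pvFindErr, hl] at h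
    · simp [pvFindErr, hl] at h
      simp [pvGoB, hl, ih _ h]

theorem pvFindErr_some (ls : List Int) (i j : Nat) (h : pvFindErr ls i = some j) :
    i ≤ j ∧ j - i < ls.length ∧
      pvGoB ls false = ls.take (j - i) ++ List.replicate (ls.length - (j - i)) (-1) := by
  induction ls generalizing i j with
  | nil => simp [pvFindErr] at h
  | cons l ls ih =>
    by_cases hl : l = -1
    · simp [pvFindErr, hl] at h
      subst h
      refine ⟨le_rfl, by simp, ?_⟩
      simp [pvGoB, hl, pvGoB_true, List.replicate_succ]
    · simp [pvFindErr, hl] at h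
      obtain ⟨h1, h2, h3⟩ := ih (i + 1) j h
      have hij : i + 1 ≤ j := h1
      refine ⟨by omega, by simp; omega, ?_⟩
      have hji : j - i = (j - (i + 1)) + 1 := by omega
      simp [pvGoB, hl, h3, hji, List.take_succ_cons]

theorem pvFill_eq (k : Nat) : ∀ (l : List Int) (p : Nat), l.length = p + k →
    (List.range' p k).foldl (fun acc i => acc.set i (-1)) l
      = l.take p ++ List.replicate k (-1) := by
  induction k with
  | zero =>
    intro l p h
    simp [List.take_of_length_le (show l.length ≤ p by omega)]
  | succ k ih =>
    intro l p h
    rw [List.range'_succ, List.foldl_cons]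
    have hp : p < l.length := by omega
    have hset : l.set p (-1) = l.take p ++ (-1 : Int) :: l.drop (p + 1) := by
      rw [List.set_eq_take_append_cons_drop]
      simp [hp]
    rw [ih (l.set p (-1)) (p + 1) (by simp; omega)]
    rw [hset]
    have htp : (l.take p).length = p := List.length_take_of_le (le_of_lt hp)
    rw [show p + 1 = (l.take p).length + 1 by rw [htp]]
    rw [List.take_append]
    simp [List.replicate_succ]

-- ===== VERDICT (by name: the statement is the Claim_ definition above) =====
theorem normalize_process_labels_spec : Claim_equal_normalize_process_labels := by
  intro labels _
  unfold Spec_normalize_process_labels normalize_process_labels normalize_process_labels_alt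
  by_cases hnil : labels = []
  · simp [hnil, pvGoB]
  · simp only [hnil, if_false]
    cases hf : pvFindErr labels 0 with
    | none => exact (pvFindErr_none labels 0 hf).symm
    | some p =>
      obtain ⟨_, hlt, hB⟩ := pvFindErr_some labels 0 p hf
      simp only [Nat.sub_zero] at hlt hB
      rw [hB]
      unfold pvFill
      exact pvFill_eq (labels.length - p) labels p (by omega)
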